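-- pv_equiv track=rewrite | github.com/kh277/BOJ | 백준/Silver/2567. 색종이 － 2/색종이 － 2.py | solve
-- ===== SOURCE A (Python) =====
-- INF = 105
--
-- dx = [-1, 1, 0, 0]
--
-- dy = [0, 0, -1, 1]
--
-- def solve(N, square):
--     grid = [[0 for _ in range(INF)] for _ in range(INF)]
--
--     # 색종이가 붙은 부분 1로 변경
--     for i in range(N):
--         for y in range(square[i][1], square[i][1]+10):
--             for x in range(square[i][0], square[i][0]+10):
--                 grid[y][x] = 1
--
--     # 1로 표시된 칸 중 상하좌우에 0의 개수 총합 구하기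
--     circ = 0
--     for curY in range(INF):
--         for curX in range(INF):
--             if grid[curY][curX] == 1:
--                 for i in range(4):
--                     nextY = curY + dy[i]
--                     nextX = curX + dx[i]
--                     if grid[nextY][nextX] == 0:
--                         circ += 1
--
--     return circ
-- ===== SOURCE B (Python) =====
-- def solve(N, square):
--     # perimeter = 4*P - 2*adj over the painted-cell predicate; no grid array is built
--     tops = [(square[i][0], square[i][1]) for i in range(N)]
--
--     def painted(x, y):
--         return any(x0 <= x < x0 + 10 and y0 <= y < y0 + 10 for (x0, y0) in tops)
--
--     P = 0
--     adj = 0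
--     for y in range(105):
--         for x in range(105):
--             if painted(x, y):
--                 P += 1
--                 if painted(x + 1, y):
--                     adj += 1
--                 if painted(x, y + 1):
--                     adj += 1
--     return 4 * P - 2 * adj
-- ===== Notes on version B (the rewrite author's own statement) =====
-- stated objective: alternative
-- what changed: B drops the 105x105 mutable grid and the 4-direction neighbour scan entirely: it evaluates a painted(x,y) predicate straight off the square list and returns 4*P - 2*adj, where P counts painted cells and adj counts right/down adjacent painted pairs.
-- outside the precondition, e.g. on solve(1, [[-11, 0]]): A returns 40, B returns 0
import Mathlib
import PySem

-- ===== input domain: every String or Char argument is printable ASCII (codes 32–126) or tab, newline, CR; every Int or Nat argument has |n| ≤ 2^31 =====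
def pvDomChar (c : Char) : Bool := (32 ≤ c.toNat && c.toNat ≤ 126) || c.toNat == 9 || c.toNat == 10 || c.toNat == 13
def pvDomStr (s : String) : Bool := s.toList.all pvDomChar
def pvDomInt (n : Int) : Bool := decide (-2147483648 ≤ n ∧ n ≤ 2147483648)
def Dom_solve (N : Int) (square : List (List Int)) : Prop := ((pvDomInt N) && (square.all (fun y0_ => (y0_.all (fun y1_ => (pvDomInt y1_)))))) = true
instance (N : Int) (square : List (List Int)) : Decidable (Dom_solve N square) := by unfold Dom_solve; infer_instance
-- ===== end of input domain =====

-- B replaces the grid-marking + 4-direction scan by a painted(x,y) predicate and the identity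
-- perimeter = 4*P - 2*adj (P painted cells, adj right/down adjacent painted pairs).

-- ===== PORT A =====
def pvINF : Int := 105
def pvDx : List Int := [-1, 1, 0, 0]
def pvDy : List Int := [0, 0, -1, 1]

-- grid[y][x] = v  (rows are independent fresh lists, so the in-place row mutation is a functional row update)
def pvSetCell (g : List (List Int)) (y x v : Int) : List (List Int) :=
  PySem.List.pySetD g y (PySem.List.pySetD (PySem.List.pyGetD g y []) x v)

def solve (N : Int) (square : List (List Int)) : Int :=
  let grid : List (List Int) :=
    (PySem.List.pyRange 0 pvINF 1).map (fun _ => (PySem.List.pyRange 0 pvINF 1).map (fun _ => (0 : Int)))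
  let grid :=
    (PySem.List.pyRange 0 N 1).foldl (fun g i =>
      let sy := PySem.List.pyGetD (PySem.List.pyGetD square i []) 1 0
      let sx := PySem.List.pyGetD (PySem.List.pyGetD square i []) 0 0
      (PySem.List.pyRange sy (sy + 10) 1).foldl (fun g y =>
        (PySem.List.pyRange sx (sx + 10) 1).foldl (fun g x => pvSetCell g y x 1) g) g) grid
  let circ :=
    (PySem.List.pyRange 0 pvINF 1).foldl (fun circ curY =>
      (PySem.List.pyRange 0 pvINF 1).foldl (fun circ curX =>
        if PySem.List.pyGetD (PySem.List.pyGetD grid curY []) curX 0 = 1 then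
          (PySem.List.pyRange 0 4 1).foldl (fun circ i =>
            let nextY := curY + PySem.List.pyGetD pvDy i 0
            let nextX := curX + PySem.List.pyGetD pvDx i 0
            if PySem.List.pyGetD (PySem.List.pyGetD grid nextY []) nextX 0 = 0 then circ + 1 else circ) circ
        else circ) circ) 0
  circ

-- ===== PORT B =====
def solve_alt (N : Int) (square : List (List Int)) : Int :=
  let tops : List (Int × Int) :=
    (PySem.List.pyRange 0 N 1).map (fun i =>
      (PySem.List.pyGetD (PySem.List.pyGetD square i []) 0 0,
       PySem.List.pyGetD (PySem.List.pyGetD square i []) 1 0))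
  let painted : Int → Int → Bool := fun x y =>
    tops.any (fun t => decide (t.1 ≤ x) && decide (x < t.1 + 10) && decide (t.2 ≤ y) && decide (y < t.2 + 10))
  let pa :=
    (PySem.List.pyRange 0 105 1).foldl (fun pa y =>
      (PySem.List.pyRange 0 105 1).foldl (fun pa x =>
        if painted x y then
          (pa.1 + 1,
           pa.2 + (if painted (x + 1) y then 1 else 0) + (if painted x (y + 1) then 1 else 0))
        else pa) pa) ((0 : Int), (0 : Int))
  4 * pa.1 - 2 * pa.2

-- ===== PRECONDITION & SPEC =====
-- Pre_ restricts to the natural domain of the BOJ task: each of the first N squares exists, has both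
-- coordinates, and lies fully inside the 105x105 grid (0 ≤ x,y ≤ 94). Outside it A raises IndexError,
-- except for far-negative coordinates (≤ -11) where Python's negative-index wraparound silently paints
-- wrapped rows/columns — an artefact of A's grid indexing that is excluded as outside the task's domain.
def Pre_solve (N : Int) (square : List (List Int)) : Prop :=
  N ≤ (square.length : Int) ∧
  ∀ sq ∈ square.take N.toNat, 2 ≤ sq.length ∧
    0 ≤ PySem.List.pyGetD sq 0 0 ∧ PySem.List.pyGetD sq 0 0 ≤ 94 ∧
    0 ≤ PySem.List.pyGetD sq 1 0 ∧ PySem.List.pyGetD sq 1 0 ≤ 94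
instance (N : Int) (square : List (List Int)) : Decidable (Pre_solve N square) := by
  unfold Pre_solve; infer_instance

def pvWitness_solve : Int × List (List Int) := (1, [[0, 0]])

def Spec_solve (N : Int) (square : List (List Int)) (out : Int) : Prop := out = solve_alt N square
instance (N : Int) (square : List (List Int)) (out : Int) : Decidable (Spec_solve N square out) := by
  unfold Spec_solve; infer_instance

-- ===== CLAIM (what is proved, stated in full; the proofs are below) =====
def Claim_equal_solve : Prop := ∀ (N : Int) (square : List (List Int)),
  Dom_solve N square → Pre_solve N square → Spec_solve N square (solve N square)

-- ===== LEMMAS AND PROOFS =====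

-- painted-cell predicate (identical to B's local `painted`)
def pvF (tops : List (Int × Int)) (x y : Int) : Bool :=
  tops.any (fun t => decide (t.1 ≤ x) && decide (x < t.1 + 10) && decide (t.2 ≤ y) && decide (y < t.2 + 10))

def pvE (tops : List (Int × Int)) (x y : Int) : Int := if pvF tops x y then 1 else 0

def pvRead (g : List (List Int)) (x y : Int) : Int :=
  PySem.List.pyGetD (PySem.List.pyGetD g y []) x 0

def pvShape (g : List (List Int)) : Prop := g.length = 105 ∧ ∀ row ∈ g, row.length = 105

def pvGood (g : List (List Int)) (tops : List (Int × Int)) : Prop :=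
  pvShape g ∧ ∀ x y : Int, 0 ≤ x → x < 105 → 0 ≤ y → y < 105 → pvRead g x y = pvE tops x y

def pvTopsOk (tops : List (Int × Int)) : Prop :=
  ∀ t ∈ tops, 0 ≤ t.1 ∧ t.1 ≤ 94 ∧ 0 ≤ t.2 ∧ t.2 ≤ 94

theorem pvF_bounds {tops : List (Int × Int)} {x y : Int} (hok : pvTopsOk tops)
    (h : pvF tops x y = true) : 0 ≤ x ∧ x ≤ 103 ∧ 0 ≤ y ∧ y ≤ 103 := by
  simp only [pvF, List.any_eq_true, Bool.and_eq_true, decide_eq_true_eq] at h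
  obtain ⟨t, ht, ⟨⟨h1, h2⟩, h3⟩, h4⟩ := h
  have := hok t ht
  omega

theorem pvE_zero {tops : List (Int × Int)} {x y : Int} (hok : pvTopsOk tops)
    (h : x < 0 ∨ 103 < x ∨ y < 0 ∨ 103 < y) : pvE tops x y = 0 := by
  unfold pvE
  by_cases hf : pvF tops x y = true
  · have := pvF_bounds hok hf; omega
  · simp [hf]

theorem pvShape_setCell {g : List (List Int)} {y x v : Int} (hs : pvShape g)
    (hy0 : 0 ≤ y) (hy1 : y < 105) : pvShape (pvSetCell g y x v) := by
  obtain ⟨hl, hr⟩ := hs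
  unfold pvSetCell
  rw [PySem.List.pySetD_of_nonneg _ _ hy0]
  constructor
  · simpa using hl
  · intro row hrow
    rcases List.mem_or_eq_of_mem_set hrow with h | h
    · exact hr row h
    · subst h
      rw [PySem.List.length_pySetD]
      rw [PySem.List.pyGetD_eq_getElem _ _ hy0 (by omega)]
      exact hr _ (List.getElem_mem _)

theorem pvRead_setCell {g : List (List Int)} {y x : Int} (v : Int) (hs : pvShape g)
    (hy0 : 0 ≤ y) (hy1 : y < 105) (hx0 : 0 ≤ x) (hx1 : x < 105)
    (x' y' : Int) (hx'0 : 0 ≤ x') (hx'1 : x' < 105) (hy'0 : 0 ≤ y') (hy'1 : y' < 105) :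
    pvRead (pvSetCell g y x v) x' y' = if x' = x ∧ y' = y then v else pvRead g x' y' := by
  obtain ⟨hl, hr⟩ := hs
  have hrowmem : PySem.List.pyGetD g y [] ∈ g := by
    rw [PySem.List.pyGetD_eq_getElem _ _ hy0 (by omega)]
    exact List.getElem_mem _
  have hrowlen : (PySem.List.pyGetD g y []).length = 105 := hr _ hrowmem
  unfold pvSetCell pvRead
  rw [PySem.List.pySetD_of_nonneg _ _ hy0]
  rw [PySem.List.pyGetD_eq_getElem _ _ hy'0 (by simp [hl]; omega)]
  rw [List.getElem_set]
  by_cases hyy : y.toNat = y'.toNat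
  · have hyeq : y' = y := by omega
    rw [if_pos hyy]
    rw [PySem.List.pySetD_of_nonneg _ _ hx0]
    rw [PySem.List.pyGetD_eq_getElem _ _ hx'0 (by simp [hrowlen]; omega)]
    rw [List.getElem_set]
    by_cases hxx : x.toNat = x'.toNat
    · rw [if_pos hxx, if_pos ⟨by omega, hyeq⟩]
    · rw [if_neg hxx, if_neg (by omega)]
      rw [PySem.List.pyGetD_eq_getElem _ _ hy'0 (by omega), PySem.List.pyGetD_eq_getElem _ _ hx'0 ?_]
      · simp only [PySem.List.pyGetD_eq_getElem _ _ hy0 (by omega : y < (g.length : Int)), hyy]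
      · have : g[y'.toNat] ∈ g := List.getElem_mem _
        rw [hr _ this]; omega
  · rw [if_neg hyy, if_neg (by omega)]
    rw [PySem.List.pyGetD_eq_getElem _ _ hy'0 (by omega)]

theorem pvMarkCols (yy : Int) (hy0 : 0 ≤ yy) (hy1 : yy < 105) :
    ∀ (n : Nat) (a : Int) (g : List (List Int)), pvShape g → 0 ≤ a → a + n ≤ 105 →
    pvShape ((PySem.List.pyRange a (a + n) 1).foldl (fun g x => pvSetCell g yy x 1) g) ∧
    ∀ x' y' : Int, 0 ≤ x' → x' < 105 → 0 ≤ y' → y' < 105 →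
      pvRead ((PySem.List.pyRange a (a + n) 1).foldl (fun g x => pvSetCell g yy x 1) g) x' y' =
      if a ≤ x' ∧ x' < a + n ∧ y' = yy then 1 else pvRead g x' y' := by
  intro n
  induction n with
  | zero =>
    intro a g hs ha hb
    rw [PySem.List.pyRange_one_eq_nil (by omega)]
    refine ⟨hs, ?_⟩
    intro x' y' h1 h2 h3 h4
    rw [if_neg (by omega)]
    rfl
  | succ n ih =>
    intro a g hs ha hb
    rw [PySem.List.pyRange_one_cons (by omega)]
    rw [List.foldl_cons]
    have heq : a + ((n : Int) + 1) = (a + 1) + n := by omega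
    have hcast : a + ((n + 1 : Nat) : Int) = a + ((n : Int) + 1) := by push_cast; ring
    rw [hcast, heq]
    have hs' : pvShape (pvSetCell g yy a 1) := pvShape_setCell hs hy0 hy1
    obtain ⟨S, R⟩ := ih (a + 1) (pvSetCell g yy a 1) hs' (by omega) (by push_cast at hb ⊢; omega)
    refine ⟨S, ?_⟩
    intro x' y' h1 h2 h3 h4
    rw [R x' y' h1 h2 h3 h4,
        pvRead_setCell 1 hs hy0 hy1 ha (by push_cast at hb; omega) x' y' h1 h2 h3 h4]
    split_ifs <;> omega

theorem pvMarkRows (a : Int) (k : Nat) (ha0 : 0 ≤ a) (hak : a + k ≤ 105) :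
    ∀ (m : Nat) (b : Int) (g : List (List Int)), pvShape g → 0 ≤ b → b + m ≤ 105 →
    pvShape ((PySem.List.pyRange b (b + m) 1).foldl
      (fun g y => (PySem.List.pyRange a (a + k) 1).foldl (fun g x => pvSetCell g y x 1) g) g) ∧
    ∀ x' y' : Int, 0 ≤ x' → x' < 105 → 0 ≤ y' → y' < 105 →
      pvRead ((PySem.List.pyRange b (b + m) 1).foldl
        (fun g y => (PySem.List.pyRange a (a + k) 1).foldl (fun g x => pvSetCell g y x 1) g) g) x' y' =
      if a ≤ x' ∧ x' < a + k ∧ b ≤ y' ∧ y' < b + m then 1 else pvRead g x' y' := by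
  intro m
  induction m with
  | zero =>
    intro b g hs hb0 hb1
    rw [PySem.List.pyRange_one_eq_nil (a := b) (b := b + ((0 : Nat) : Int)) (by omega)]
    refine ⟨hs, ?_⟩
    intro x' y' h1 h2 h3 h4
    rw [if_neg (by omega)]
    rfl
  | succ m ih =>
    intro b g hs hb0 hb1
    rw [PySem.List.pyRange_one_cons (a := b) (b := b + ((m + 1 : Nat) : Int)) (by push_cast; omega)]
    rw [List.foldl_cons]
    have hcast : b + ((m + 1 : Nat) : Int) = (b + 1) + m := by push_cast; ring
    rw [hcast]
    obtain ⟨S1, R1⟩ := pvMarkCols b hb0 (by push_cast at hb1; omega) k a g hs ha0 hak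
    obtain ⟨S, R⟩ := ih (b + 1) _ S1 (by omega) (by push_cast at hb1 ⊢; omega)
    refine ⟨S, ?_⟩
    intro x' y' h1 h2 h3 h4
    rw [R x' y' h1 h2 h3 h4, R1 x' y' h1 h2 h3 h4]
    split_ifs <;> omega

theorem pvGood_mark {g : List (List Int)} {tops : List (Int × Int)} (t : Int × Int)
    (hg : pvGood g tops) (h1 : 0 ≤ t.1) (h2 : t.1 ≤ 94) (h3 : 0 ≤ t.2) (h4 : t.2 ≤ 94) :
    pvGood ((PySem.List.pyRange t.2 (t.2 + 10) 1).foldl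
      (fun g y => (PySem.List.pyRange t.1 (t.1 + 10) 1).foldl (fun g x => pvSetCell g y x 1) g) g)
      (tops ++ [t]) := by
  obtain ⟨hs, hr⟩ := hg
  have hc1 : t.1 + (10 : Int) = t.1 + ((10 : Nat) : Int) := by norm_num
  have hc2 : t.2 + (10 : Int) = t.2 + ((10 : Nat) : Int) := by norm_num
  rw [hc1, hc2]
  obtain ⟨S, R⟩ := pvMarkRows t.1 10 h1 (by push_cast; omega) 10 t.2 g hs h3 (by push_cast; omega)
  refine ⟨S, ?_⟩
  intro x y hx0 hx1 hy0 hy1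
  rw [R x y hx0 hx1 hy0 hy1, hr x y hx0 hx1 hy0 hy1]
  have hF : pvF (tops ++ [t]) x y
      = (pvF tops x y || (decide (t.1 ≤ x) && decide (x < t.1 + 10) && decide (t.2 ≤ y) && decide (y < t.2 + 10))) := by
    simp [pvF]
  unfold pvE
  rw [hF]
  by_cases hp : t.1 ≤ x ∧ x < t.1 + ((10 : Nat) : Int) ∧ t.2 ≤ y ∧ y < t.2 + ((10 : Nat) : Int)
  · rw [if_pos hp]
    have hb : (decide (t.1 ≤ x) && decide (x < t.1 + 10) && decide (t.2 ≤ y) && decide (y < t.2 + 10)) = true := by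
      push_cast at hp
      simp only [Bool.and_eq_true, decide_eq_true_eq]
      omega
    rw [hb, Bool.or_true]
    rfl
  · rw [if_neg hp]
    cases hbool : (decide (t.1 ≤ x) && decide (x < t.1 + 10) && decide (t.2 ≤ y) && decide (y < t.2 + 10)) with
    | true =>
      exfalso
      simp only [Bool.and_eq_true, decide_eq_true_eq] at hbool
      push_cast at hp
      omega
    | false => rw [Bool.or_false]

theorem pvGood_fold (square : List (List Int)) :
    ∀ (L : List Int) (g : List (List Int)) (T : List (Int × Int)),
    pvGood g T →
    (∀ i ∈ L, 0 ≤ PySem.List.pyGetD (PySem.List.pyGetD square i []) 0 0 ∧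
              PySem.List.pyGetD (PySem.List.pyGetD square i []) 0 0 ≤ 94 ∧
              0 ≤ PySem.List.pyGetD (PySem.List.pyGetD square i []) 1 0 ∧
              PySem.List.pyGetD (PySem.List.pyGetD square i []) 1 0 ≤ 94) →
    pvGood (L.foldl (fun g i =>
      let sy := PySem.List.pyGetD (PySem.List.pyGetD square i []) 1 0
      let sx := PySem.List.pyGetD (PySem.List.pyGetD square i []) 0 0
      (PySem.List.pyRange sy (sy + 10) 1).foldl (fun g y =>
        (PySem.List.pyRange sx (sx + 10) 1).foldl (fun g x => pvSetCell g y x 1) g) g) g)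
      (T ++ L.map (fun i =>
        (PySem.List.pyGetD (PySem.List.pyGetD square i []) 0 0,
         PySem.List.pyGetD (PySem.List.pyGetD square i []) 1 0))) := by
  intro L
  induction L with
  | nil => intro g T hg _; simpa using hg
  | cons i L ih =>
    intro g T hg hb
    have hbi := hb i (List.mem_cons_self ..)
    rw [List.foldl_cons, List.map_cons, List.append_cons]
    exact ih _ _
      (pvGood_mark (g := g) (tops := T)
        (PySem.List.pyGetD (PySem.List.pyGetD square i []) 0 0,
         PySem.List.pyGetD (PySem.List.pyGetD square i []) 1 0)
        hg hbi.1 hbi.2.1 hbi.2.2.1 hbi.2.2.2)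
      (fun j hj => hb j (List.mem_cons_of_mem _ hj))

theorem pvGood_init :
    pvGood ((PySem.List.pyRange 0 pvINF 1).map
      (fun _ => (PySem.List.pyRange 0 pvINF 1).map (fun _ => (0 : Int)))) [] := by
  refine ⟨⟨?_, ?_⟩, ?_⟩
  · simp [pvINF, PySem.List.length_pyRange_one]
  · intro row hrow
    obtain ⟨a, _, rfl⟩ := List.mem_map.mp hrow
    simp [pvINF, PySem.List.length_pyRange_one]
  · intro x y hx0 hx1 hy0 hy1
    unfold pvRead
    simp only [pvINF]
    rw [PySem.List.pyGetD_map_pyRange_of_nonneg _ 105 y [] hy0 (by omega)]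
    rw [PySem.List.pyGetD_map_pyRange_of_nonneg _ 105 x 0 hx0 (by omega)]
    simp [pvE, pvF]

theorem pvTopsOk_of_pre {N : Int} {square : List (List Int)} (hpre : Pre_solve N square) :
    ∀ i ∈ PySem.List.pyRange 0 N 1,
      0 ≤ PySem.List.pyGetD (PySem.List.pyGetD square i []) 0 0 ∧
      PySem.List.pyGetD (PySem.List.pyGetD square i []) 0 0 ≤ 94 ∧
      0 ≤ PySem.List.pyGetD (PySem.List.pyGetD square i []) 1 0 ∧
      PySem.List.pyGetD (PySem.List.pyGetD square i []) 1 0 ≤ 94 := by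
  intro i hi
  rw [PySem.List.mem_pyRange_one] at hi
  obtain ⟨hN, hall⟩ := hpre
  have hilen : i < (square.length : Int) := by omega
  have hget : PySem.List.pyGetD square i [] = square[i.toNat]'(by omega) :=
    PySem.List.pyGetD_eq_getElem _ _ hi.1 hilen
  have hlt : i.toNat < (square.take N.toNat).length := by
    simp only [List.length_take]
    omega
  have hmem : square[i.toNat]'(by omega) ∈ square.take N.toNat := by
    have hgt := List.getElem_take (xs := square) (j := N.toNat) (i := i.toNat) (h := hlt)
    exact hgt ▸ List.getElem_mem hlt
  have hb := hall _ hmem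
  rw [hget]
  exact ⟨hb.2.1, hb.2.2.1, hb.2.2.2.1, hb.2.2.2.2⟩

theorem pvRead_ext {g : List (List Int)} {tops : List (Int × Int)}
    (hg : pvGood g tops) (hok : pvTopsOk tops)
    (x y : Int) (hx0 : -1 ≤ x) (hx1 : x ≤ 104) (hy0 : -1 ≤ y) (hy1 : y ≤ 104) :
    pvRead g x y = pvE tops x y := by
  obtain ⟨⟨hl, hr⟩, hread⟩ := hg
  have hne : g ≠ [] := by intro h; rw [h] at hl; simp at hl
  have hrowwrap : PySem.List.pyGetD g (-1) [] = PySem.List.pyGetD g 104 [] := by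
    rw [PySem.List.pyGetD_neg_one g [] hne, List.getLast_eq_getElem,
        PySem.List.pyGetD_eq_getElem g (i := 104) [] (by omega) (by rw [hl]; omega)]
    congr 1
    omega
  have colwrap : ∀ y' : Int, 0 ≤ y' → y' < 105 →
      PySem.List.pyGetD (PySem.List.pyGetD g y' []) (-1) 0 =
      PySem.List.pyGetD (PySem.List.pyGetD g y' []) 104 0 := by
    intro y' h0 h1
    have hrm : PySem.List.pyGetD g y' [] ∈ g := by
      rw [PySem.List.pyGetD_eq_getElem _ _ h0 (by rw [hl]; push_cast; omega)]
      exact List.getElem_mem _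
    have hrl := hr _ hrm
    have hne' : PySem.List.pyGetD g y' [] ≠ [] := by intro h; rw [h] at hrl; simp at hrl
    rw [PySem.List.pyGetD_neg_one _ 0 hne', List.getLast_eq_getElem,
        PySem.List.pyGetD_eq_getElem (PySem.List.pyGetD g y' []) (i := 104) 0 (by omega) (by rw [hrl]; omega)]
    congr 1
    omega
  by_cases hy : y = -1
  · subst hy
    show PySem.List.pyGetD (PySem.List.pyGetD g (-1) []) x 0 = _
    rw [hrowwrap]
    by_cases hx : x = -1
    · subst hx
      rw [colwrap 104 (by omega) (by omega)]
      have h1 := hread 104 104 (by omega) (by omega) (by omega) (by omega)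
      unfold pvRead at h1
      rw [h1, pvE_zero hok (by omega), pvE_zero hok (by omega)]
    · have h1 := hread x 104 (by omega) (by omega) (by omega) (by omega)
      unfold pvRead at h1
      rw [h1, pvE_zero hok (by omega), pvE_zero hok (by omega)]
  · by_cases hx : x = -1
    · subst hx
      show PySem.List.pyGetD (PySem.List.pyGetD g y []) (-1) 0 = _
      rw [colwrap y (by omega) (by omega)]
      have h1 := hread 104 y (by omega) (by omega) (by omega) (by omega)
      unfold pvRead at h1
      rw [h1, pvE_zero hok (by omega), pvE_zero hok (by omega)]
    · exact hread x y (by omega) (by omega) (by omega) (by omega)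

def pvTA (tops : List (Int × Int)) (x y : Int) : Int :=
  if pvF tops x y then
    (1 - pvE tops (x - 1) y) + (1 - pvE tops (x + 1) y) + (1 - pvE tops x (y - 1)) + (1 - pvE tops x (y + 1))
  else 0

def pvTAdj (tops : List (Int × Int)) (x y : Int) : Int :=
  pvE tops x y * (pvE tops (x + 1) y + pvE tops x (y + 1))

def pvTops (N : Int) (square : List (List Int)) : List (Int × Int) :=
  (PySem.List.pyRange 0 N 1).map (fun i =>
    (PySem.List.pyGetD (PySem.List.pyGetD square i []) 0 0,
     PySem.List.pyGetD (PySem.List.pyGetD square i []) 1 0))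

theorem pvStepE (tops : List (Int × Int)) (c x y : Int) :
    (if pvE tops x y = 0 then c + 1 else c) = c + (1 - pvE tops x y) := by
  unfold pvE
  split_ifs <;> omega

theorem pvDirFold {g : List (List Int)} {tops : List (Int × Int)}
    (hg : pvGood g tops) (hok : pvTopsOk tops)
    (x y : Int) (hx0 : 0 ≤ x) (hx1 : x ≤ 103) (hy0 : 0 ≤ y) (hy1 : y ≤ 103) (c : Int) :
    (PySem.List.pyRange 0 4 1).foldl (fun circ i =>
      let nextY := y + PySem.List.pyGetD pvDy i 0
      let nextX := x + PySem.List.pyGetD pvDx i 0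
      if PySem.List.pyGetD (PySem.List.pyGetD g nextY []) nextX 0 = 0 then circ + 1 else circ) c
    = c + ((1 - pvE tops (x - 1) y) + (1 - pvE tops (x + 1) y) + (1 - pvE tops x (y - 1)) + (1 - pvE tops x (y + 1))) := by
  have h4 : PySem.List.pyRange 0 4 1 = [0, 1, 2, 3] := by decide
  have rd : ∀ x' y' : Int, -1 ≤ x' → x' ≤ 104 → -1 ≤ y' → y' ≤ 104 →
      PySem.List.pyGetD (PySem.List.pyGetD g y' []) x' 0 = pvE tops x' y' := by
    intro x' y' a b c' d
    have h := pvRead_ext hg hok x' y' a b c' d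
    unfold pvRead at h
    exact h
  rw [h4]
  simp only [List.foldl_cons, List.foldl_nil]
  simp only [show PySem.List.pyGetD pvDy (0:Int) 0 = 0 from by decide,
             show PySem.List.pyGetD pvDx (0:Int) 0 = -1 from by decide,
             show PySem.List.pyGetD pvDy (1:Int) 0 = 0 from by decide,
             show PySem.List.pyGetD pvDx (1:Int) 0 = 1 from by decide,
             show PySem.List.pyGetD pvDy (2:Int) 0 = -1 from by decide,
             show PySem.List.pyGetD pvDx (2:Int) 0 = 0 from by decide,
             show PySem.List.pyGetD pvDy (3:Int) 0 = 1 from by decide,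
             show PySem.List.pyGetD pvDx (3:Int) 0 = 0 from by decide]
  rw [rd (x + -1) (y + 0) (by omega) (by omega) (by omega) (by omega),
      rd (x + 1) (y + 0) (by omega) (by omega) (by omega) (by omega),
      rd (x + 0) (y + -1) (by omega) (by omega) (by omega) (by omega),
      rd (x + 0) (y + 1) (by omega) (by omega) (by omega) (by omega)]
  simp only [show x + -1 = x - 1 from by ring, show y + 0 = y from by ring,
             show y + -1 = y - 1 from by ring, show x + 0 = x from by ring]
  rw [pvStepE, pvStepE, pvStepE, pvStepE]
  ring

theorem pvSweepA {g : List (List Int)} {tops : List (Int × Int)}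
    (hg : pvGood g tops) (hok : pvTopsOk tops) :
    (PySem.List.pyRange 0 pvINF 1).foldl (fun circ curY =>
      (PySem.List.pyRange 0 pvINF 1).foldl (fun circ curX =>
        if PySem.List.pyGetD (PySem.List.pyGetD g curY []) curX 0 = 1 then
          (PySem.List.pyRange 0 4 1).foldl (fun circ i =>
            let nextY := curY + PySem.List.pyGetD pvDy i 0
            let nextX := curX + PySem.List.pyGetD pvDx i 0
            if PySem.List.pyGetD (PySem.List.pyGetD g nextY []) nextX 0 = 0 then circ + 1 else circ) circ
        else circ) circ) 0
    = ((PySem.List.pyRange 0 105 1).map (fun y =>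
        ((PySem.List.pyRange 0 105 1).map (fun x => pvTA tops x y)).sum)).sum := by
  simp only [pvINF]
  rw [PySem.List.foldl_congr_mem _ _
      (fun circ curY => circ + ((PySem.List.pyRange 0 105 1).map (fun x => pvTA tops x curY)).sum) 0 ?_]
  · rw [PySem.List.foldl_add]
    simp
  · intro acc yv hyv
    beta_reduce
    rw [PySem.List.mem_pyRange_one] at hyv
    rw [PySem.List.foldl_congr_mem _ _ (fun circ curX => circ + pvTA tops curX yv) acc ?_]
    · rw [PySem.List.foldl_add]
    · intro c xv hxv
      beta_reduce
      rw [PySem.List.mem_pyRange_one] at hxv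
      have hcond : PySem.List.pyGetD (PySem.List.pyGetD g yv []) xv 0 = pvE tops xv yv := by
        have h := pvRead_ext hg hok xv yv (by omega) (by omega) (by omega) (by omega)
        unfold pvRead at h
        exact h
      rw [hcond]
      by_cases hf : pvF tops xv yv
      · have hb := pvF_bounds hok hf
        rw [if_pos (by simp [pvE, hf])]
        rw [pvDirFold hg hok xv yv (by omega) (by omega) (by omega) (by omega) c]
        unfold pvTA
        rw [if_pos hf]
      · rw [if_neg (by simp [pvE, hf])]
        unfold pvTA
        rw [if_neg hf]
        omega

theorem pvSweepB (tops : List (Int × Int)) :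
    (PySem.List.pyRange 0 105 1).foldl (fun pa y =>
      (PySem.List.pyRange 0 105 1).foldl (fun pa x =>
        if pvF tops x y then
          (pa.1 + 1,
           pa.2 + (if pvF tops (x + 1) y then 1 else 0) + (if pvF tops x (y + 1) then 1 else 0))
        else pa) pa) ((0 : Int), (0 : Int))
    = (((PySem.List.pyRange 0 105 1).map (fun y =>
          ((PySem.List.pyRange 0 105 1).map (fun x => pvE tops x y)).sum)).sum,
       ((PySem.List.pyRange 0 105 1).map (fun y =>
          ((PySem.List.pyRange 0 105 1).map (fun x => pvTAdj tops x y)).sum)).sum) := by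
  rw [PySem.List.foldl_congr_mem _ _
      (fun pa y => (pa.1 + ((PySem.List.pyRange 0 105 1).map (fun x => pvE tops x y)).sum,
                    pa.2 + ((PySem.List.pyRange 0 105 1).map (fun x => pvTAdj tops x y)).sum))
      ((0 : Int), (0 : Int)) ?_]
  · rw [PySem.List.foldl_prod_mk
        (f := fun s y => s + ((PySem.List.pyRange 0 105 1).map (fun x => pvE tops x y)).sum)
        (g := fun s y => s + ((PySem.List.pyRange 0 105 1).map (fun x => pvTAdj tops x y)).sum)]
    rw [PySem.List.foldl_add, PySem.List.foldl_add]
    simp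
  · intro pa yv hyv
    beta_reduce
    rw [PySem.List.foldl_congr_mem _ _
        (fun pa x => (pa.1 + pvE tops x yv, pa.2 + pvTAdj tops x yv)) pa ?_]
    · rw [PySem.List.foldl_prod_mk
          (f := fun s x => s + pvE tops x yv)
          (g := fun s x => s + pvTAdj tops x yv)]
      rw [PySem.List.foldl_add, PySem.List.foldl_add]
    · intro q xv hxv
      beta_reduce
      by_cases hf : pvF tops xv yv
      · rw [if_pos hf]
        simp [pvE, pvTAdj, hf, one_mul, add_assoc]
      · rw [if_neg hf]
        simp [pvE, pvTAdj, hf]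

theorem pvSweepB' (tops : List (Int × Int)) :
    (PySem.List.pyRange 0 105 1).foldl (fun pa y =>
      (PySem.List.pyRange 0 105 1).foldl (fun pa x =>
        if tops.any (fun t => decide (t.1 ≤ x) && decide (x < t.1 + 10) && decide (t.2 ≤ y) && decide (y < t.2 + 10)) then
          (pa.1 + 1,
           pa.2 + (if tops.any (fun t => decide (t.1 ≤ x + 1) && decide (x + 1 < t.1 + 10) && decide (t.2 ≤ y) && decide (y < t.2 + 10)) then 1 else 0)
                + (if tops.any (fun t => decide (t.1 ≤ x) && decide (x < t.1 + 10) && decide (t.2 ≤ y + 1) && decide (y + 1 < t.2 + 10)) then 1 else 0))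
        else pa) pa) ((0 : Int), (0 : Int))
    = (((PySem.List.pyRange 0 105 1).map (fun y =>
          ((PySem.List.pyRange 0 105 1).map (fun x => pvE tops x y)).sum)).sum,
       ((PySem.List.pyRange 0 105 1).map (fun y =>
          ((PySem.List.pyRange 0 105 1).map (fun x => pvTAdj tops x y)).sum)).sum) :=
  pvSweepB tops

theorem pvSum_congr {α : Type} (l : List α) (f g : α → Int) (h : ∀ a ∈ l, f a = g a) :
    (l.map f).sum = (l.map g).sum := by rw [List.map_congr_left h]

theorem pvSum_sub {α : Type} (l : List α) (f g : α → Int) :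
    (l.map (fun x => f x - g x)).sum = (l.map f).sum - (l.map g).sum := by
  induction l with
  | nil => simp
  | cons a l ih => simp only [List.map_cons, List.sum_cons, ih]; ring

theorem pvSum_mul_left {α : Type} (l : List α) (c : Int) (f : α → Int) :
    (l.map (fun x => c * f x)).sum = c * (l.map f).sum := by
  induction l with
  | nil => simp
  | cons a l ih => simp only [List.map_cons, List.sum_cons, ih]; ring

theorem pvSum_comm {α β : Type} (l1 : List α) (l2 : List β) (f : α → β → Int) :
    (l1.map (fun a => (l2.map (fun b => f a b)).sum)).sum
    = (l2.map (fun b => (l1.map (fun a => f a b)).sum)).sum := by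
  induction l1 with
  | nil => simp
  | cons a l ih =>
    simp only [List.map_cons, List.sum_cons, ih, PySem.List.sum_map_add_int]

theorem pvSum_shift (u : Int → Int) (n : Int) (hn : 0 ≤ n) (h1 : u (-1) = 0) (h2 : u n = 0) :
    ((PySem.List.pyRange 0 (n + 1) 1).map (fun x => u x * u (x - 1))).sum
    = ((PySem.List.pyRange 0 (n + 1) 1).map (fun x => u x * u (x + 1))).sum := by
  have hL : ((PySem.List.pyRange 0 (n + 1) 1).map (fun x => u x * u (x - 1))).sum
      = ((List.range n.toNat).map (fun k : Nat => u ((k : Int) + 1) * u (k : Int))).sum := by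
    rw [PySem.List.pyRange_one_cons (a := 0) (b := n + 1) (by omega)]
    simp only [List.map_cons, List.sum_cons]
    rw [show (0 : Int) - 1 = -1 from by ring, h1, mul_zero, zero_add,
        show (0 : Int) + 1 = 1 from by ring]
    rw [PySem.List.pyRange_one 1 (n + 1), show (n + 1 - 1 : Int) = n from by ring]
    simp only [List.map_map]
    apply pvSum_congr
    intro k _
    simp only [Function.comp_apply]
    rw [show (1 : Int) + (k : Int) - 1 = (k : Int) from by ring,
        show (1 : Int) + (k : Int) = (k : Int) + 1 from by ring]
  have hR : ((PySem.List.pyRange 0 (n + 1) 1).map (fun x => u x * u (x + 1))).sum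
      = ((List.range n.toNat).map (fun k : Nat => u (k : Int) * u ((k : Int) + 1))).sum := by
    rw [PySem.List.pyRange_one_succ_right (a := 0) (b := n) (by omega)]
    rw [List.map_append, List.sum_append]
    simp only [List.map_cons, List.map_nil, List.sum_cons, List.sum_nil, h2, zero_mul, add_zero]
    rw [PySem.List.pyRange_one 0 n, show (n - 0 : Int) = n from by ring]
    simp only [List.map_map]
    apply pvSum_congr
    intro k _
    simp only [Function.comp_apply]
    rw [show (0 : Int) + (k : Int) = (k : Int) from by ring]
  rw [hL, hR]
  apply pvSum_congr
  intro k _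
  exact mul_comm _ _

theorem pvTA_expand (tops : List (Int × Int)) (x y : Int) :
    pvTA tops x y = 4 * pvE tops x y -
      (pvE tops x y * pvE tops (x - 1) y + pvE tops x y * pvE tops (x + 1) y +
       pvE tops x y * pvE tops x (y - 1) + pvE tops x y * pvE tops x (y + 1)) := by
  unfold pvTA pvE
  by_cases hf : pvF tops x y
  · simp [hf]; ring
  · simp [hf]

theorem pvTAdj_expand (tops : List (Int × Int)) (x y : Int) :
    pvTAdj tops x y = pvE tops x y * pvE tops (x + 1) y + pvE tops x y * pvE tops x (y + 1) := by
  unfold pvTAdj; ring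

theorem pvIdentity (tops : List (Int × Int)) (hok : pvTopsOk tops) :
    ((PySem.List.pyRange 0 105 1).map (fun y =>
      ((PySem.List.pyRange 0 105 1).map (fun x => pvTA tops x y)).sum)).sum
    = 4 * ((PySem.List.pyRange 0 105 1).map (fun y =>
        ((PySem.List.pyRange 0 105 1).map (fun x => pvE tops x y)).sum)).sum
      - 2 * ((PySem.List.pyRange 0 105 1).map (fun y =>
        ((PySem.List.pyRange 0 105 1).map (fun x => pvTAdj tops x y)).sum)).sum := by
  have h105 : (105 : Int) = 104 + 1 := by norm_num
  -- horizontal shift, per row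
  have hH : ∀ y : Int, ((PySem.List.pyRange 0 105 1).map (fun x => pvE tops x y * pvE tops (x - 1) y)).sum
      = ((PySem.List.pyRange 0 105 1).map (fun x => pvE tops x y * pvE tops (x + 1) y)).sum := by
    intro y
    rw [h105]
    exact pvSum_shift (fun x => pvE tops x y) 104 (by omega)
      (pvE_zero hok (by omega)) (pvE_zero hok (by omega))
  -- vertical shift, per column (after exchanging the summation order)
  have hVcol : ∀ x : Int, ((PySem.List.pyRange 0 105 1).map (fun y => pvE tops x y * pvE tops x (y - 1))).sum
      = ((PySem.List.pyRange 0 105 1).map (fun y => pvE tops x y * pvE tops x (y + 1))).sum := by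
    intro x
    rw [h105]
    exact pvSum_shift (fun y => pvE tops x y) 104 (by omega)
      (pvE_zero hok (by omega)) (pvE_zero hok (by omega))
  have hV : ((PySem.List.pyRange 0 105 1).map (fun y =>
        ((PySem.List.pyRange 0 105 1).map (fun x => pvE tops x y * pvE tops x (y - 1))).sum)).sum
      = ((PySem.List.pyRange 0 105 1).map (fun y =>
        ((PySem.List.pyRange 0 105 1).map (fun x => pvE tops x y * pvE tops x (y + 1))).sum)).sum := by
    rw [pvSum_comm (PySem.List.pyRange 0 105 1) (PySem.List.pyRange 0 105 1)
          (fun y x => pvE tops x y * pvE tops x (y - 1)),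
        pvSum_comm (PySem.List.pyRange 0 105 1) (PySem.List.pyRange 0 105 1)
          (fun y x => pvE tops x y * pvE tops x (y + 1))]
    exact pvSum_congr _ _ _ (fun x _ => hVcol x)
  -- expand the A-side term rowwise
  have hrowA : ∀ y : Int, ((PySem.List.pyRange 0 105 1).map (fun x => pvTA tops x y)).sum
      = 4 * ((PySem.List.pyRange 0 105 1).map (fun x => pvE tops x y)).sum
        - (((PySem.List.pyRange 0 105 1).map (fun x => pvE tops x y * pvE tops (x - 1) y)).sum
          + ((PySem.List.pyRange 0 105 1).map (fun x => pvE tops x y * pvE tops (x + 1) y)).sum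
          + ((PySem.List.pyRange 0 105 1).map (fun x => pvE tops x y * pvE tops x (y - 1))).sum
          + ((PySem.List.pyRange 0 105 1).map (fun x => pvE tops x y * pvE tops x (y + 1))).sum) := by
    intro y
    rw [pvSum_congr _ _ _ (fun x _ => pvTA_expand tops x y)]
    rw [pvSum_sub, pvSum_mul_left,
        PySem.List.sum_map_add_int, PySem.List.sum_map_add_int, PySem.List.sum_map_add_int]
  have hrowB : ∀ y : Int, ((PySem.List.pyRange 0 105 1).map (fun x => pvTAdj tops x y)).sum
      = ((PySem.List.pyRange 0 105 1).map (fun x => pvE tops x y * pvE tops (x + 1) y)).sum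
        + ((PySem.List.pyRange 0 105 1).map (fun x => pvE tops x y * pvE tops x (y + 1))).sum := by
    intro y
    rw [pvSum_congr _ _ _ (fun x _ => pvTAdj_expand tops x y)]
    rw [PySem.List.sum_map_add_int]
  rw [pvSum_congr _ _ _ (fun y _ => hrowA y),
      pvSum_congr _ _ _ (fun y _ => hrowB y)]
  rw [pvSum_sub, pvSum_mul_left,
      PySem.List.sum_map_add_int, PySem.List.sum_map_add_int, PySem.List.sum_map_add_int,
      PySem.List.sum_map_add_int]
  rw [pvSum_congr _ _ _ (fun y _ => hH y), hV]
  ring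

theorem pvTopsOk_pvTops {N : Int} {square : List (List Int)} (hpre : Pre_solve N square) :
    pvTopsOk (pvTops N square) := by
  intro t ht
  obtain ⟨i, hi, rfl⟩ := List.mem_map.mp ht
  have h := pvTopsOk_of_pre hpre i hi
  exact ⟨h.1, h.2.1, h.2.2.1, h.2.2.2⟩

theorem pvSolveA_eq (N : Int) (square : List (List Int)) (hpre : Pre_solve N square) :
    solve N square
    = ((PySem.List.pyRange 0 105 1).map (fun y =>
        ((PySem.List.pyRange 0 105 1).map (fun x => pvTA (pvTops N square) x y)).sum)).sum := by
  have hgood := pvGood_fold square (PySem.List.pyRange 0 N 1)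
      ((PySem.List.pyRange 0 pvINF 1).map (fun _ => (PySem.List.pyRange 0 pvINF 1).map (fun _ => (0 : Int))))
      [] pvGood_init (pvTopsOk_of_pre hpre)
  rw [List.nil_append] at hgood
  have hgood' : pvGood _ (pvTops N square) := hgood
  simp only [solve]
  rw [pvSweepA hgood' (pvTopsOk_pvTops hpre)]

theorem pvSolveB_eq (N : Int) (square : List (List Int)) :
    solve_alt N square
    = 4 * ((PySem.List.pyRange 0 105 1).map (fun y =>
        ((PySem.List.pyRange 0 105 1).map (fun x => pvE (pvTops N square) x y)).sum)).sum
      - 2 * ((PySem.List.pyRange 0 105 1).map (fun y =>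
        ((PySem.List.pyRange 0 105 1).map (fun x => pvTAdj (pvTops N square) x y)).sum)).sum := by
  simp only [solve_alt]
  rw [pvSweepB' ((PySem.List.pyRange 0 N 1).map (fun i =>
      (PySem.List.pyGetD (PySem.List.pyGetD square i []) 0 0,
       PySem.List.pyGetD (PySem.List.pyGetD square i []) 1 0)))]
  rfl

-- ===== VERDICT (by name: the statement is the Claim_ definition above) =====
theorem solve_spec : Claim_equal_solve := by
  intro N square hdom hpre
  unfold Spec_solve
  rw [pvSolveA_eq N square hpre, pvSolveB_eq N square]
  exact pvIdentity _ (pvTopsOk_pvTops hpre)
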